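/-
  TEST of the decode bridge (UserX/Decode.lean) and of the bulk commands (UserX/DecodeImage.lean): three decode facts
  checked by the kernel, each turned into a `User.Decodes` statement about every user state that has the bytes at its RIP.
-/
import UserX.DecodeImage
namespace X86.User.DecodeTest
open X86 X86.User

#udecode add_rax_rbx "48 01 d8"
#udecode mulss_xmm0_xmm1 "f3 0f 59 c1"
#udecode call_rel32 "e8 73 bc 00 00"
#udecode ret "c3"
#udecode hlt "f4"
#decode_all X86.User.DecodeTest.Dec "4801d8" "f30f1005a8650100" "0f1f00"

variable {L : Layout} {μ : Microarch} {u : State}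

/-- `add rax, rbx` at RIP. -/
example (hc : CodeAt u.mem u.rip [0x48, 0x01, 0xd8]) (hr : L.Has u.rip 3) :
    ∃ s, Decodes L μ u s :=
  ⟨_, Decodes.of_isInsn add_rax_rbx hc hr⟩

/-- `mulss xmm0, xmm1` at RIP. -/
example (hc : CodeAt u.mem u.rip [0xf3, 0x0f, 0x59, 0xc1]) (hr : L.Has u.rip 4) :
    ∃ s, Decodes L μ u s :=
  ⟨_, Decodes.of_isInsn mulss_xmm0_xmm1 hc hr⟩

/-- `call rel32` at RIP. -/
example (hc : CodeAt u.mem u.rip [0xe8, 0x73, 0xbc, 0x00, 0x00]) (hr : L.Has u.rip 5) :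
    ∃ s, Decodes L μ u s :=
  ⟨_, Decodes.of_isInsn call_rel32 hc hr⟩

/-- The step rule: what remains of `add rax, rbx` is the body's flat reading, from the state with RIP advanced. -/
example (Q : State → Prop) (hc : CodeAt u.mem u.rip [0x48, 0x01, 0xd8]) (hr : L.Has u.rip 3)
    (hw : ∀ m, Abs L m u →
      Sem.wpUser L μ
        (Insn.ADD.add { rex := true, rexW := true, modrmMod := some 3, modrm := some 216, opcode := 1, len := 3 }
          (Operand.reg Width.w64 (Dec.gpr 0)) (Operand.reg Width.w64 (Dec.gpr 3)))
        (fun _ u' => Q u') (fun _ _ => False) (u.setRip (u.rip + 3))) :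
    Step L μ u Q :=
  Step.of_isInsn_at add_rax_rbx hc hr rfl hw

-- a cell with gated rows: TZCNT / BSF
#udecode_gated tzcnt_rax_rbx [(Feature.bmi1, true)] "f3 48 0f bc c3"
#udecode_gated bsf_rax_rbx [(Feature.bmi1, false)] "f3 48 0f bc c3"

/-- `tzcnt rax, rbx` on the machines that enumerate BMI1. -/
example (hg : ∀ m, Abs L m u → m.cfg.has Feature.bmi1 = true)
    (hc : CodeAt u.mem u.rip [0xf3, 0x48, 0x0f, 0xbc, 0xc3]) (hr : L.Has u.rip 5) :
    ∃ s, Decodes L μ u s := by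
  refine ⟨_, Decodes.of_isInsn_gated (G := [(Feature.bmi1, true)]) ?_ tzcnt_rax_rbx hc hr⟩
  intro m hm p hp
  simp only [List.mem_cons, List.not_mem_nil, or_false] at hp
  subst hp
  exact hg m hm

open Lean Elab Command in
/-- The look-up: the fact of the instruction at the head of fifteen bytes of code. -/
elab "#lookup_test" : command => do
  let cand : List UInt8 := [0xf3, 0x0f, 0x10, 0x05, 0xa8, 0x65, 0x01, 0x00, 0x48, 0x01, 0xd8, 0x90, 0x90, 0x90, 0x90]
  let some (len, name) := decodeFactAt? (← getEnv) cand | throwError "no fact"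
  let fact ← liftTermElabM (DecodeFact.read name)
  logInfo m!"{len} {name} instr={fact.instr.isSome} len={fact.len}"
  let (len2, name2) ← liftTermElabM (decodeFactAt [0x48, 0x89, 0xe5, 0x90])
  logInfo m!"on the fly: {len2} {name2}"

#lookup_test
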